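-- pv_equiv track=rewrite | github.com/enimiste/advent-of-code | 2023/day_2/round_1.py | possible_games_ids
-- ===== SOURCE A (Python) =====
-- from typing import Tuple, Union
--
-- def possible_games_ids(games: list[(int, set[(int, int, int)])]) -> set[int]:
--   def is_possible(game_sets: set[(int, int, int)]) -> bool:
--     def strategy(game_set: Tuple[int, int, int]) -> bool:
--       BAG = (12, 13, 14)#(red, green, blue)
--       (r, g, b) = game_set
--       b = r<=BAG[0] and g<=BAG[1] and b<=BAG[2]
--       return b
--     for gs in game_sets:
--       if not strategy(gs):
--         return False
--     return True
--
--   return {id for (id, game_sets) in games if is_possible(game_sets)}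
-- ===== SOURCE B (Python) =====
-- def possible_games_ids(games):
--   def mx(vals):
--     return max(vals, default=0)
--   return {gid for (gid, game_sets) in games
--           if mx(r for (r, _, _) in game_sets) <= 12
--           and mx(g for (_, g, _) in game_sets) <= 13
--           and mx(b for (_, _, b) in game_sets) <= 14}
-- ===== Notes on version B (the rewrite author's own statement) =====
-- stated objective: alternative
-- what changed: Replaces the early-returning per-set checker helper with component-wise maxima (max with default=0) per game, compared once against the bag bounds.
import Mathlib
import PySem

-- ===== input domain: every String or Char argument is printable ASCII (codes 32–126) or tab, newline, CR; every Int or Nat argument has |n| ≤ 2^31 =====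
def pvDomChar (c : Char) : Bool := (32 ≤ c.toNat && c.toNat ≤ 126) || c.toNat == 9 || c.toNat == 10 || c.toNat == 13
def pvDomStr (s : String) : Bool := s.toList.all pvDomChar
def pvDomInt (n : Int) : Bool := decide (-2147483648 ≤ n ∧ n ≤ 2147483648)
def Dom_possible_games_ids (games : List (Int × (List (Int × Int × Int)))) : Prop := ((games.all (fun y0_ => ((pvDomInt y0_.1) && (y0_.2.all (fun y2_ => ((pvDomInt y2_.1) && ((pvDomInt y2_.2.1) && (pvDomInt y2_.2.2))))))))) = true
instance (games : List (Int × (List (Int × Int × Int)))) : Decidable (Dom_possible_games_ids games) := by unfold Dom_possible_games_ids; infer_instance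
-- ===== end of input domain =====

-- B replaces A's early-returning per-set checker with component-wise maxima (max, default=0)
-- compared once against the bag bounds; alternative decomposition, same cost (return value only).

-- ===== PORT A =====
-- nested helper `strategy` of A
def pvStrategy (game_set : Int × Int × Int) : Bool :=
  decide (game_set.1 ≤ 12) && decide (game_set.2.1 ≤ 13) && decide (game_set.2.2 ≤ 14)

-- nested helper `is_possible` of A: early-return loop over the game's sets
def pvIsPossible : List (Int × Int × Int) → Bool
  | [] => true
  | gs :: rest => if ¬ (pvStrategy gs = true) then false else pvIsPossible rest

def possible_games_ids (games : List (Int × (List (Int × Int × Int)))) : List Int :=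
  games.foldl (fun s p => if pvIsPossible p.2 then PySem.Set.add s p.1 else s) PySem.Set.empty

-- ===== PORT B =====
-- helper `mx` of B: max(vals, default=0)
def pvMx (vals : List Int) : Int :=
  match vals with
  | [] => 0
  | v :: vs => vs.foldl max v

def possible_games_ids_alt (games : List (Int × (List (Int × Int × Int)))) : List Int :=
  games.foldl (fun s p =>
    if pvMx (p.2.map (fun t => t.1)) ≤ 12 ∧
       pvMx (p.2.map (fun t => t.2.1)) ≤ 13 ∧
       pvMx (p.2.map (fun t => t.2.2)) ≤ 14
    then PySem.Set.add s p.1 else s) PySem.Set.empty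

-- ===== PRECONDITION & SPEC =====
def Spec_possible_games_ids (games : List (Int × (List (Int × Int × Int)))) (out : List Int) : Prop := out = possible_games_ids_alt games
instance (games : List (Int × (List (Int × Int × Int)))) (out : List Int) : Decidable (Spec_possible_games_ids games out) := by unfold Spec_possible_games_ids; infer_instance

-- ===== CLAIM (what is proved, stated in full; the proofs are below) =====
def Claim_equal_possible_games_ids : Prop := ∀ (games : List (Int × (List (Int × Int × Int)))), Dom_possible_games_ids games → Spec_possible_games_ids games (possible_games_ids games)

-- ===== LEMMAS AND PROOFS =====
theorem pv_foldl_max_le (c a : Int) (l : List Int) :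
    List.foldl max a l ≤ c ↔ a ≤ c ∧ ∀ x ∈ l, x ≤ c := by
  induction l generalizing a with
  | nil => simp
  | cons x xs ih =>
      simp only [List.foldl_cons, ih, List.mem_cons]
      constructor
      · rintro ⟨h1, h2⟩
        exact ⟨le_trans (le_max_left a x) h1,
               fun y hy => hy.elim (fun e => e ▸ le_trans (le_max_right a x) h1) (h2 y)⟩
      · rintro ⟨h1, h2⟩
        exact ⟨max_le h1 (h2 x (Or.inl rfl)), fun y hy => h2 y (Or.inr hy)⟩

theorem pvMx_le {c : Int} (hc : 0 ≤ c) (l : List Int) :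
    pvMx l ≤ c ↔ ∀ x ∈ l, x ≤ c := by
  cases l with
  | nil => simpa [pvMx]
  | cons v vs =>
      simp only [pvMx, pv_foldl_max_le, List.mem_cons]
      constructor
      · rintro ⟨h1, h2⟩ y hy
        exact hy.elim (fun e => e ▸ h1) (h2 y)
      · intro h
        exact ⟨h v (Or.inl rfl), fun y hy => h y (Or.inr hy)⟩

theorem pvIsPossible_iff (l : List (Int × Int × Int)) :
    pvIsPossible l = true ↔ ∀ t ∈ l, pvStrategy t = true := by
  induction l with
  | nil => simp [pvIsPossible]
  | cons gs rest ih =>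
      by_cases h : pvStrategy gs = true
      · simp [pvIsPossible, h, ih]
      · simp [pvIsPossible, h]

theorem pv_cond_eq (l : List (Int × Int × Int)) :
    pvIsPossible l =
      decide (pvMx (l.map (fun t => t.1)) ≤ 12 ∧
              pvMx (l.map (fun t => t.2.1)) ≤ 13 ∧
              pvMx (l.map (fun t => t.2.2)) ≤ 14) := by
  rcases Bool.eq_false_or_eq_true (pvIsPossible l) with h | h <;> rw [h]
  · symm; rw [decide_eq_true_eq]
    rw [pvIsPossible_iff] at h
    refine ⟨?_, ?_, ?_⟩ <;> rw [pvMx_le (by norm_num)] <;>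
      intro x hx <;> obtain ⟨t, ht, rfl⟩ := List.mem_map.mp hx <;>
      have := h t ht <;>
      simp only [pvStrategy, Bool.and_eq_true, decide_eq_true_eq] at this
    · exact this.1.1
    · exact this.1.2
    · exact this.2
  · symm; rw [decide_eq_false_iff_not]
    intro hcon
    obtain ⟨h1, h2, h3⟩ := hcon
    rw [pvMx_le (by norm_num)] at h1 h2 h3
    have hT : pvIsPossible l = true := by
      rw [pvIsPossible_iff]
      intro t ht
      simp only [pvStrategy, Bool.and_eq_true, decide_eq_true_eq]
      exact ⟨⟨h1 _ (List.mem_map_of_mem ht), h2 _ (List.mem_map_of_mem ht)⟩,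
             h3 _ (List.mem_map_of_mem ht)⟩
    simp [hT] at h

-- ===== VERDICT (by name: the statement is the Claim_ definition above) =====
theorem possible_games_ids_spec : Claim_equal_possible_games_ids := by
  intro games _
  show possible_games_ids games = possible_games_ids_alt games
  unfold possible_games_ids possible_games_ids_alt
  congr 1
  funext s p
  rw [pv_cond_eq]
  simp
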